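-- pv_equiv track=rewrite | github.com/industry-coop-skku-skplanet1/website_summarization_for_AIspeaker | table_reader.py | table_2_list
-- ===== SOURCE A (Python) =====
-- def table_2_list(table,row_base):
--     temp_table=[]
--     if row_base:
--         for row in table:
--             temp_row=[]
--             for block in row:
--                 temp_row.append(' '.join(block))
--             temp_table.append('/'.join(temp_row))
--     else:
--         for col in range(len(table[0])):
--             temp_col=[]
--             for row in table:
--                 temp_col.append(' '.join(row[col]))
--             temp_table.append('/'.join(temp_col))
--     return temp_table
-- ===== SOURCE B (Python) =====
-- def table_2_list(table, row_base):
--     # Two-pass: precompute the joined cell grid, then assemble rows, or build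
--     # all columns simultaneously in a single row-major sweep.
--     cells = [[' '.join(block) for block in row] for row in table]
--     if row_base:
--         return ['/'.join(r) for r in cells]
--     ncols = len(table[0])
--     cols = [[] for _ in range(ncols)]
--     for r in cells:
--         for c in range(ncols):
--             cols[c].append(r[c])
--     return ['/'.join(col) for col in cols]
-- ===== Notes on version B (the rewrite author's own statement) =====
-- stated objective: alternative
-- what changed: B precomputes the joined cell grid in one pass, then either joins rows directly or builds all columns simultaneously in a single row-major sweep with per-column accumulators, instead of A's fused column-major nested loops.
import Mathlib
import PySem

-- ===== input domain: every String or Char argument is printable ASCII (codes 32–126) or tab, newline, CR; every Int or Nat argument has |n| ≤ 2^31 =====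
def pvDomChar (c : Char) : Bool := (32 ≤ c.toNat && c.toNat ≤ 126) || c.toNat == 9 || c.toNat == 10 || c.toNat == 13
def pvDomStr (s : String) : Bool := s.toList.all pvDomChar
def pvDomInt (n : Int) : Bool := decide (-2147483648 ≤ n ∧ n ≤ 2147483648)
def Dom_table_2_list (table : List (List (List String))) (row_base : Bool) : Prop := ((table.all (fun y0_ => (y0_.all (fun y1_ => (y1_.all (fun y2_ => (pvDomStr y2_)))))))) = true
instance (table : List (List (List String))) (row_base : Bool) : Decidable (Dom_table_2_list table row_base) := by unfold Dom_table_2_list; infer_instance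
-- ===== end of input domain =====

-- B replaces A's fused column-major nested loops by a two-pass decomposition: precompute the
-- joined cell grid, then join rows directly, or build all columns at once in one row-major sweep.

-- ===== PORT A =====
-- row[col] / table[0] raise IndexError in Python on ragged/empty tables; those inputs are
-- excluded by Pre_table_2_list, so the getD/headD defaults below are never reached there.
def table_2_list (table : List (List (List String))) (row_base : Bool) : List String :=
  if row_base then
    table.foldl (fun temp_table row =>
      temp_table ++ [PySem.Str.join "/"
        (row.foldl (fun temp_row block => temp_row ++ [PySem.Str.join " " block]) [])]) []
  else
    (List.range (table.headD []).length).foldl (fun temp_table col =>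
      temp_table ++ [PySem.Str.join "/"
        (table.foldl (fun temp_col row => temp_col ++ [PySem.Str.join " " (row.getD col [])]) [])]) []

-- ===== PORT B =====
-- cols[c].append(r[c]) is transcribed as set c (getD c ++ [r.getD c]); defaults unreachable under Pre_.
def table_2_list_alt (table : List (List (List String))) (row_base : Bool) : List String :=
  let cells := table.map (fun row => row.map (fun block => PySem.Str.join " " block))
  if row_base then
    cells.map (fun r => PySem.Str.join "/" r)
  else
    let ncols := (table.headD []).length
    let cols := cells.foldl (fun cols r =>
        (List.range ncols).foldl
          (fun cs c => cs.set c (cs.getD c [] ++ [r.getD c ""])) cols)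
      (List.replicate ncols ([] : List String))
    cols.map (fun col => PySem.Str.join "/" col)

-- ===== PRECONDITION & SPEC =====
-- Pre_ excludes exactly the inputs where Python A raises IndexError: with row_base falsy,
-- an empty table (table[0]) or a row shorter than table[0] (row[col]).
def Pre_table_2_list (table : List (List (List String))) (row_base : Bool) : Prop :=
  row_base = true ∨ (table ≠ [] ∧ ∀ row ∈ table, (table.headD []).length ≤ row.length)
instance (table : List (List (List String))) (row_base : Bool) : Decidable (Pre_table_2_list table row_base) := by unfold Pre_table_2_list; infer_instance

def pvWitness_table_2_list : List (List (List String)) × Bool :=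
  ([[["a", "x"], ["b"]], [["c"], ["d"]]], false)

def Spec_table_2_list (table : List (List (List String))) (row_base : Bool) (out : List String) : Prop := out = table_2_list_alt table row_base
instance (table : List (List (List String))) (row_base : Bool) (out : List String) : Decidable (Spec_table_2_list table row_base out) := by unfold Spec_table_2_list; infer_instance

-- ===== CLAIM (what is proved, stated in full; the proofs are below) =====
def Claim_equal_table_2_list : Prop := ∀ (table : List (List (List String))) (row_base : Bool), Dom_table_2_list table row_base → Pre_table_2_list table row_base → Spec_table_2_list table row_base (table_2_list table row_base)

-- ===== LEMMAS AND PROOFS ===== (verdict theorem at the bottom)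

-- append-accumulator fold is a map
theorem pv_foldl_concat {α β : Type} (f : α → β) (l : List α) (init : List β) :
    l.foldl (fun acc x => acc ++ [f x]) init = init ++ l.map f := by
  induction l generalizing init with
  | nil => simp
  | cons x xs ih => simp [List.foldl_cons, ih, List.append_assoc]

-- one row-sweep over the column accumulators, as a map
theorem pv_set_fold (g : Nat → List String) :
    ∀ (n : Nat) (cols0 : List (List String)), n ≤ cols0.length →
    (List.range n).foldl (fun cs c => cs.set c (cs.getD c [] ++ g c)) cols0
      = (List.range n).map (fun c => cols0.getD c [] ++ g c) ++ cols0.drop n := by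
  intro n
  induction n with
  | zero => intro cols0 _; simp
  | succ n ih =>
    intro cols0 hlen
    rw [List.range_succ, List.foldl_append, ih cols0 (by omega)]
    have hdrop : cols0.drop n = cols0.getD n [] :: cols0.drop (n + 1) := by
      rw [List.getD_eq_getElem cols0 [] (by omega), List.drop_eq_getElem_cons (by omega)]
    have hget : ((List.range n).map (fun c => cols0.getD c [] ++ g c) ++ cols0.drop n).getD n []
        = cols0.getD n [] := by
      rw [hdrop]
      rw [List.getD_eq_getElem _ [] (by simp)]
      rw [List.getElem_append_right (by simp)]
      simp
    simp only [List.foldl_cons, List.foldl_nil, hget]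
    rw [hdrop, List.set_append_right _ _ (by simp)]
    simp [List.append_assoc]

-- folding the whole grid row by row over mapped accumulators
theorem pv_rows_fold (n : Nat) (cells : List (List String)) :
    ∀ (f : Nat → List String),
    cells.foldl (fun cols r =>
        (List.range n).foldl (fun cs c => cs.set c (cs.getD c [] ++ [r.getD c ""])) cols)
      ((List.range n).map f)
      = (List.range n).map (fun c => f c ++ cells.map (fun r => r.getD c "")) := by
  induction cells with
  | nil => intro f; simp
  | cons r rest ih =>
    intro f
    have hstep := pv_set_fold (fun c => [r.getD c ""]) n ((List.range n).map f) (by simp)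
    have hmapget : ∀ c ∈ List.range n, ((List.range n).map f).getD c [] ++ [r.getD c ""]
        = f c ++ [r.getD c ""] := by
      intro c hc
      rw [List.getD_eq_getElem _ [] (by simpa using List.mem_range.mp hc)]
      simp
    simp only [List.foldl_cons]
    rw [hstep, List.map_congr_left hmapget, List.drop_eq_nil_of_le (by simp), List.append_nil,
      ih (fun c => f c ++ [r.getD c ""])]
    refine List.map_congr_left ?_
    intro c _
    simp [List.append_assoc]

theorem table_2_list_spec : Claim_equal_table_2_list := by
  unfold Claim_equal_table_2_list
  intro table row_base _ hpre
  unfold Spec_table_2_list table_2_list table_2_list_alt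
  cases row_base with
  | true =>
    rw [if_pos rfl, if_pos rfl, pv_foldl_concat]
    simp only [List.nil_append, List.map_map]
    refine List.map_congr_left ?_
    intro row _
    rw [pv_foldl_concat]
    simp
  | false =>
    obtain hPre | ⟨hne, hlen⟩ := hpre
    · exact absurd hPre (by simp)
    rw [if_neg (by simp), if_neg (by simp)]
    simp only []
    set n := (table.headD []).length
    have hrepl : List.replicate n ([] : List String) = (List.range n).map (fun _ => []) := by
      simp [List.map_const']
    rw [pv_foldl_concat, hrepl, pv_rows_fold n]
    simp only [List.nil_append, List.map_map]
    refine List.map_congr_left ?_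
    intro col hcol
    have hcoln : col < n := List.mem_range.mp hcol
    rw [pv_foldl_concat]
    simp only [List.nil_append, List.nil_append, Function.comp]
    congr 1
    refine List.map_congr_left ?_
    intro row hrow
    have hr : col < row.length := lt_of_lt_of_le hcoln (hlen row hrow)
    simp only [Function.comp]
    rw [List.getD_eq_getElem _ "" (by simpa using hr), List.getD_eq_getElem _ [] hr]
    simp
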